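-- pv_equiv track=rewrite | github.com/PopoLeKok0/Python-coursework | Tests/test2_300259705.py | tanganyika
-- ===== SOURCE A (Python) =====
-- def tanganyika(L):
--     '''(list of int)->list
--
--     Precondition: len(L)>=1
--     This function should return a new list Q where Q should be the same as L
--     except that where ever L has multiple zeros in a row Q should have only one zero.
--     >>> tanganyika([1,2,0,0,0,3,0])
--     [1, 2, 0, 3, 0]
--     >>> tanganyika([1,2,0,0,0,3,0,0,0,0])
--     [1, 2, 0, 3, 0]
--     >>> tanganyika([0,0,1,0,2,0,0,0,3,0,0,0,0])
--     [0, 1, 0, 2, 0, 3, 0]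
--     >>> tanganyika([1,2,0,3,0])
--     [1, 2, 0, 3, 0]
--     '''
--     Q=[]
--     for i in range(len(L)):
--        if L[i-1]==L[i]==0:
--            pass
--        else :
--            Q.append(L[i])
--
--     return Q
-- ===== SOURCE B (Python) =====
-- def tanganyika(L):
--     # Run-skipping scan: for each zero run emit a single 0 and jump past the
--     # whole run; nonzero elements are copied one by one.  Keeps the first
--     # element of every zero run, including a leading one (as the docstring's
--     # third example specifies).
--     Q = []
--     i = 0
--     n = len(L)
--     while i < n:
--         if L[i] == 0:
--             Q.append(0)
--             i += 1
--             while i < n and L[i] == 0: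
--                 i += 1
--         else:
--             Q.append(L[i])
--             i += 1
--     return Q
-- ===== Notes on version B (the rewrite author's own statement) =====
-- stated objective: alternative
-- what changed: Replaces A's per-index filter comparing each element with its (wrap-around) predecessor by a run-skipping scan: an outer loop that copies nonzero elements and, on meeting a zero, emits one 0 and an inner loop jumps past the whole zero run, so no predecessor comparison exists.
-- intended difference: On nonempty lists whose first and last elements are both zero, A's wrap-around comparison of index 0 with the last element silently drops the leading zero (contradicting A's own docstring example), while B keeps one zero per run including the leading one, which is the intended value. — e.g. on tanganyika([0, 1, 0]): A returns [1, 0], B returns [0, 1, 0]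
import Mathlib
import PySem

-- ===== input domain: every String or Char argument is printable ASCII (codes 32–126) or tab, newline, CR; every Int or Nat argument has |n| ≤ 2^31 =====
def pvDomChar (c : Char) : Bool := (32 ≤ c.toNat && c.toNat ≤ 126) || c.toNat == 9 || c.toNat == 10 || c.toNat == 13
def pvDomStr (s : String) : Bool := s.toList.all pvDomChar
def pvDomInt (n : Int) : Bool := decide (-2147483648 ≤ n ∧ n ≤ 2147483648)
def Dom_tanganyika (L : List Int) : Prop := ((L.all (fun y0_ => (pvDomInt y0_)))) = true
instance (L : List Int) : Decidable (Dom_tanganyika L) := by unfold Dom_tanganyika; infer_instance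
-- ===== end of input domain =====

-- B collapses zero runs by a run-skipping scan (emit one 0, jump past the run) instead of
-- A's per-index predecessor comparison; same O(n) cost, and B keeps a leading zero where
-- A's wrap-around comparison drops it (the D_ region below).

-- ===== PORT A =====
-- A's loop reads L[i-1] and L[i] with i in range(len(L)); every such read is in
-- range (i-1 = -1 wraps to the last element), so pyGetD's default is never used.
def tanganyika (L : List Int) : List Int :=
  (PySem.List.pyRange 0 (L.length : Int) 1).foldl
    (fun Q i =>
      if PySem.List.pyGetD L (i - 1) 0 = 0 ∧ PySem.List.pyGetD L i 0 = 0 then Q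
      else Q ++ [PySem.List.pyGetD L i 0]) []

-- ===== PORT B =====
-- Source B's outer while loop is this structural recursion on the remaining elements;
-- its inner while loop (advance i past the zero run) is the dropWhile of the same run.
def tanganyika_alt (L : List Int) : List Int :=
  match L with
  | [] => []
  | x :: xs =>
    if x = 0 then 0 :: tanganyika_alt (xs.dropWhile (fun y => y == 0))
    else x :: tanganyika_alt xs
termination_by L.length
decreasing_by
  · exact Nat.lt_succ_of_le (List.length_dropWhile_le _ _)
  · simp

-- ===== PRECONDITION & SPEC =====
-- On nonempty lists whose first and last elements are both zero, A's wrap-around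
-- comparison of index 0 with the last element silently drops the leading zero
-- (contradicting A's own docstring example); B keeps one zero per run including
-- the leading one, which is the intended value.
def D_tanganyika (L : List Int) : Prop := L ≠ [] ∧ L.head? = some 0 ∧ L.getLast? = some 0
instance (L : List Int) : Decidable (D_tanganyika L) := by unfold D_tanganyika; infer_instance

def Spec_tanganyika (L : List Int) (out : List Int) : Prop := ¬ D_tanganyika L → out = tanganyika_alt L
instance (L : List Int) (out : List Int) : Decidable (Spec_tanganyika L out) := by unfold Spec_tanganyika; infer_instance

def pvDiffWitness_tanganyika : List Int := [0, 1, 0]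
def pvDiffWitnessOut_tanganyika : (List Int) × (List Int) := ([1, 0], [0, 1, 0])

-- ===== CLAIM (what is proved, stated in full; the proofs are below) =====
def Claim_unchanged_tanganyika : Prop := ∀ (L : List Int), Dom_tanganyika L → Spec_tanganyika L (tanganyika L)
def Claim_changed_tanganyika : Prop := Dom_tanganyika (pvDiffWitness_tanganyika) ∧ D_tanganyika (pvDiffWitness_tanganyika) ∧ tanganyika (pvDiffWitness_tanganyika) = pvDiffWitnessOut_tanganyika.1 ∧ tanganyika_alt (pvDiffWitness_tanganyika) = pvDiffWitnessOut_tanganyika.2 ∧ pvDiffWitnessOut_tanganyika.1 ≠ pvDiffWitnessOut_tanganyika.2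
def Claim_exact_tanganyika : Prop := ∀ (L : List Int), Dom_tanganyika L → D_tanganyika L → tanganyika L ≠ tanganyika_alt L

-- ===== LEMMAS AND PROOFS =====

-- The surviving tail elements: adjacent pairs of L, double-zero pairs removed.
def pvF (L : List Int) : List Int :=
  ((L.zip L.tail).filter (fun pc => !(pc.1 == 0 && pc.2 == 0))).map Prod.snd

-- The pairs (L[i-1], L[i]) visited by A's index loop are exactly the zip of the
-- rotated predecessor list with L.
lemma pv_key (L : List Int) :
    (PySem.List.pyRange 0 (L.length : Int) 1).map
        (fun i => (PySem.List.pyGetD L (i - 1) 0, PySem.List.pyGetD L i 0))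
      = (L.drop (L.length - 1) ++ L.dropLast).zip L := by
  cases L with
  | nil => simp
  | cons x t =>
    apply List.ext_getElem
    · simp [PySem.List.length_pyRange_one]
    · intro k h1 h2
      have hlen : k < (x :: t).length := by
        simpa [PySem.List.length_pyRange_one] using h1
      rw [List.getElem_map, PySem.List.getElem_pyRange_one, List.getElem_zip]
      simp only [Prod.mk.injEq]
      refine ⟨?_, ?_⟩
      · rcases Nat.eq_zero_or_pos k with hk | hk
        · subst hk
          rw [show (0 : Int) + ((0 : Nat) : Int) - 1 = -1 by simp,
            PySem.List.pyGetD_neg_one (x :: t) 0 (List.cons_ne_nil x t),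
            List.getElem_append_left (by simp [List.length_drop]),
            List.getElem_drop, List.getLast_eq_getElem]
          simp
        · rw [show (0 : Int) + (k : Int) - 1 = ((k - 1 : Nat) : Int) by omega,
            PySem.List.pyGetD_natCast, List.getD_eq_getElem _ _ (by simp at hlen ⊢; omega),
            List.getElem_append_right (by simp [List.length_drop]; omega),
            List.getElem_dropLast]
          congr 1
          simp [List.length_drop]
      · rw [show (0 : Int) + (k : Int) = ((k : Nat) : Int) by omega,
          PySem.List.pyGetD_natCast, List.getD_eq_getElem _ _ hlen]

-- A's step function, with the pass-branch flipped into the append form.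
lemma pv_step (L : List Int) :
    (fun (Q : List Int) (i : Int) =>
        if PySem.List.pyGetD L (i - 1) 0 = 0 ∧ PySem.List.pyGetD L i 0 = 0 then Q
        else Q ++ [PySem.List.pyGetD L i 0])
      = fun Q i =>
        if ¬ (PySem.List.pyGetD L (i - 1) 0 = 0 ∧ PySem.List.pyGetD L i 0 = 0)
        then Q ++ [PySem.List.pyGetD L i 0] else Q := by
  funext Q i
  by_cases h : PySem.List.pyGetD L (i - 1) 0 = 0 ∧ PySem.List.pyGetD L i 0 = 0 <;> simp [h]

-- A equals the rotated-zip filter.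
lemma pv_A_rot (L : List Int) :
    tanganyika L = (((L.drop (L.length - 1) ++ L.dropLast).zip L).filter
      (fun pc => !(pc.1 == 0 && pc.2 == 0))).map Prod.snd := by
  unfold tanganyika
  rw [← pv_key L, List.filter_map, List.map_map, pv_step L, PySem.List.foldl_append_ite]
  simp only [List.nil_append]
  congr 1
  apply List.filter_congr
  intro i _
  by_cases h1 : PySem.List.pyGetD L (i - 1) 0 = 0 <;>
    by_cases h2 : PySem.List.pyGetD L i 0 = 0 <;> simp [h1, h2]

-- zipping against the tail only uses the first n-1 elements, so dropLast is invisible.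
lemma pv_zip_dropLast (x : Int) (xs : List Int) :
    ((x :: xs).dropLast).zip xs = (x :: xs).zip xs := by
  apply List.ext_getElem
  · simp [List.length_zip]
  · intro k h1 h2
    rw [List.getElem_zip, List.getElem_zip, List.getElem_dropLast]

-- dropping all but the last element leaves exactly the last element.
lemma pv_drop_last (x : Int) (xs : List Int) :
    (x :: xs).drop ((x :: xs).length - 1) = [(x :: xs).getLast (List.cons_ne_nil x xs)] := by
  apply List.ext_getElem
  · simp [List.length_drop]
  · intro k h1 h2
    have hk : k = 0 := by simp [List.length_drop] at h1; omega
    subst hk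
    rw [List.getElem_drop, List.getLast_eq_getElem]
    simp

-- A's result, characterised: the head survives iff not (last = 0 and head = 0),
-- the rest is the adjacent-pair filter pvF.
lemma pv_A_char (x : Int) (xs : List Int) :
    tanganyika (x :: xs)
      = (if (x :: xs).getLast (List.cons_ne_nil x xs) = 0 ∧ x = 0 then [] else [x])
        ++ pvF (x :: xs) := by
  rw [pv_A_rot, pv_drop_last]
  have : ([(x :: xs).getLast (List.cons_ne_nil x xs)] ++ (x :: xs).dropLast).zip (x :: xs)
      = ((x :: xs).getLast (List.cons_ne_nil x xs), x) :: ((x :: xs).zip xs) := by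
    rw [← pv_zip_dropLast]
    rfl
  rw [this]
  unfold pvF
  by_cases h : (x :: xs).getLast (List.cons_ne_nil x xs) = 0 ∧ x = 0
  · obtain ⟨h1, h2⟩ := h
    subst h2
    simp [h1]
  · have : ¬((x :: xs).getLast (List.cons_ne_nil x xs) == 0 && (x == 0)) = true := by
      simpa using h
    simp only [List.filter_cons, List.tail_cons]
    rw [if_neg h]
    simp only [this, Bool.not_false, if_true, List.map_cons, List.singleton_append]
  -- note: both branches reduce the head pair of the filter

-- peeling one adjacent pair off pvF.
lemma pvF_cons (x y : Int) (t : List Int) :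
    pvF (x :: y :: t) = (if x = 0 ∧ y = 0 then [] else [y]) ++ pvF (y :: t) := by
  unfold pvF
  simp only [List.tail_cons, List.zip_cons_cons, List.filter_cons]
  by_cases h : x = 0 ∧ y = 0
  · simp [h.1, h.2]
  · have hb : ¬((x == 0) && (y == 0)) = true := by simpa using h
    simp [hb, h]

-- a leading zero absorbs the whole zero run in pvF.
lemma pvF_zero_dropWhile : ∀ (xs : List Int),
    pvF ((0 : Int) :: xs) = pvF ((0 : Int) :: xs.dropWhile (fun y => y == 0)) := by
  intro xs
  induction xs with
  | nil => rfl
  | cons y t ih =>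
    by_cases hy : y = 0
    · subst hy
      rw [pvF_cons]
      simp only [List.dropWhile_cons]
      simpa using ih
    · simp [hy]

-- B's result, characterised: the head always survives, then the adjacent-pair filter.
lemma pv_B_nil : tanganyika_alt [] = [] := by
  rw [tanganyika_alt]

lemma pv_B_cons : ∀ (x : Int) (xs : List Int), tanganyika_alt (x :: xs) = x :: pvF (x :: xs)
  | x, xs => by
    by_cases hx : x = 0
    · subst hx
      rw [show tanganyika_alt ((0 : Int) :: xs)
            = 0 :: tanganyika_alt (xs.dropWhile (fun y => y == 0)) by
          rw [tanganyika_alt]; simp]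
      rw [pvF_zero_dropWhile xs]
      cases h : xs.dropWhile (fun y => y == 0) with
      | nil => rw [pv_B_nil]; simp [pvF]
      | cons z t =>
        have hz : ¬ z = 0 := by
          have := List.head?_dropWhile_not (fun y => y == 0) xs
          rw [h] at this
          simpa using this
        rw [pv_B_cons z t, pvF_cons]
        simp [hz]
    · rw [show tanganyika_alt (x :: xs) = x :: tanganyika_alt xs by
        rw [tanganyika_alt]; simp [hx]]
      cases xs with
      | nil => rw [pv_B_nil]; simp [pvF]
      | cons y t =>
        rw [pv_B_cons y t, pvF_cons]
        simp [hx]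
termination_by _ xs => xs.length
decreasing_by
  · have h1 : (xs.dropWhile (fun y => y == 0)).length ≤ xs.length :=
      List.length_dropWhile_le _ _
    rw [h] at h1
    simp at h1
    omega
  · simp

-- D_ spelt out on a cons cell.
lemma pv_D_cons (x : Int) (xs : List Int) :
    D_tanganyika (x :: xs) ↔ (x = 0 ∧ (x :: xs).getLast (List.cons_ne_nil x xs) = 0) := by
  unfold D_tanganyika
  rw [List.getLast?_eq_some_getLast (List.cons_ne_nil x xs)]
  simp

-- ===== VERDICT =====
theorem tanganyika_spec : Claim_unchanged_tanganyika := by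
  intro L _ hD
  cases L with
  | nil =>
    show tanganyika [] = tanganyika_alt []
    rw [pv_B_nil]
    decide
  | cons x xs =>
    show tanganyika (x :: xs) = tanganyika_alt (x :: xs)
    rw [pv_A_char, pv_B_cons]
    rw [pv_D_cons] at hD
    have : ¬((x :: xs).getLast (List.cons_ne_nil x xs) = 0 ∧ x = 0) := fun h => hD ⟨h.2, h.1⟩
    rw [if_neg this]
    rfl

theorem tanganyika_changed : Claim_changed_tanganyika := by
  unfold Claim_changed_tanganyika
  refine ⟨by decide, by decide, by decide, ?_, by decide⟩
  show tanganyika_alt [0, 1, 0] = ([1, 0], ([0, 1, 0] : List Int)).2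
  rw [pv_B_cons]
  decide

theorem tanganyika_tight : Claim_exact_tanganyika := by
  intro L _ hD
  cases L with
  | nil => exact absurd rfl hD.1
  | cons x xs =>
    rw [pv_A_char, pv_B_cons]
    rw [pv_D_cons] at hD
    rw [if_pos ⟨hD.2, hD.1⟩]
    intro h
    have := congrArg List.length h
    simp at this
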